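-- pv_equiv track=rewrite | github.com/dcschenc/myleetcode | 2815-find-maximal-uncovered-ranges/2815-find-maximal-uncovered-ranges.py | findMaximalUncoveredRanges
-- ===== SOURCE A (Python) =====
-- from typing import List
--
-- def findMaximalUncoveredRanges(n: int, ranges: List[List[int]]) -> List[List[int]]:
--     # https://github.com/doocs/leetcode/tree/main/solution/2600-2699/2655.Find%20Maximal%20Uncovered%20Ranges
--     ranges.sort(key=lambda x: x[0])
--     prev_end = 0
--     ans = []
--     for start, end in ranges:
--         if start - 1 >= prev_end:
--             ans.append([prev_end, start-1])
--         prev_end = max(prev_end, end + 1)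
--
--     if prev_end <= n - 1:
--         ans.append([prev_end, n-1])
--     return ans
-- ===== SOURCE B (Python) =====
-- from typing import List
--
-- def findMaximalUncoveredRanges(n: int, ranges: List[List[int]]) -> List[List[int]]:
--     # Two-pass decomposition: sort in place (same mutation as A), merge the
--     # covering intervals into disjoint segments, then emit the complement.
--     ranges.sort(key=lambda x: x[0])
--     merged = []
--     cs = ce = None
--     for start, end in ranges:
--         if cs is None:
--             cs, ce = start, end
--         elif start <= ce + 1:
--             ce = max(ce, end)
--         else:
--             merged.append((cs, ce))
--             cs, ce = start, end
--     if cs is not None: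
--         merged.append((cs, ce))
--
--     ans = []
--     prev = 0
--     for s, e in merged:
--         if s - 1 >= prev:
--             ans.append([prev, s - 1])
--         prev = max(prev, e + 1)
--     if prev <= n - 1:
--         ans.append([prev, n - 1])
--     return ans
-- ===== Notes on version B (the rewrite author's own statement) =====
-- stated objective: alternative
-- what changed: A's single fused scan is split into two passes: first merge the sorted covering intervals into disjoint segments, then walk the merged segments to emit the complementary uncovered ranges.
-- outside the precondition, e.g. on findMaximalUncoveredRanges(5, [[1]]): A raises ValueError, B raises ValueError; on findMaximalUncoveredRanges(5, [[]]): A raises IndexError, B raises IndexError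
import Mathlib
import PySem

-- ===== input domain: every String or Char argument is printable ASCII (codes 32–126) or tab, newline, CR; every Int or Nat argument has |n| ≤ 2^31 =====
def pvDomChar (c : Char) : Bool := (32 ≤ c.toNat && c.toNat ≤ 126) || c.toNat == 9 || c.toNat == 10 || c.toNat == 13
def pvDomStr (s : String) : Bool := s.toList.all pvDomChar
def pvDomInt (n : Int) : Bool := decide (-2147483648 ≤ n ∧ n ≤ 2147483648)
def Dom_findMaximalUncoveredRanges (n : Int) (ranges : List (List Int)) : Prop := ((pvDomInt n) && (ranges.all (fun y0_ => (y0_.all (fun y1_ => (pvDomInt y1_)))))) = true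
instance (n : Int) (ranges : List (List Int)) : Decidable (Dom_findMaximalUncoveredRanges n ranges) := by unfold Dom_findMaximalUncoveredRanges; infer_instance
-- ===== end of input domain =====

-- B replaces A's fused scan by two passes (merge the sorted intervals into
-- disjoint segments, then emit the complement); same return value on Pre_.
-- A sorts `ranges` in place; B performs the same in-place sort, so the
-- mutation matches and the equivalence is about the return value.

-- ===== PORT A =====
-- A's loop body: for [start, end] in the sorted list (length-2 guaranteed by
-- Pre_; other shapes raise in Python and are excluded).
def pvStepA (st : List (List Int) × Int) (r : List Int) : List (List Int) × Int :=
  match r with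
  | [s, e] => ((if s - 1 ≥ st.2 then st.1 ++ [[st.2, s - 1]] else st.1), max st.2 (e + 1))
  | _ => st  -- unreachable under Pre_

def findMaximalUncoveredRanges (n : Int) (ranges : List (List Int)) : List (List Int) :=
  let sortedR := PySem.List.sorted ranges (fun x => PySem.List.pyGetD x 0 0)
  let st := sortedR.foldl pvStepA ([], 0)
  if st.2 ≤ n - 1 then st.1 ++ [[st.2, n - 1]] else st.1

-- ===== PORT B =====
-- Source B's merge loop: state = (merged, cs, ce); the `cs is None` branch is the
-- entry case handled in the caller's match on the sorted list.
def pvMergeLoop (acc : List (Int × Int)) (cs ce : Int) : List (List Int) → List (Int × Int)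
  | [] => acc ++ [(cs, ce)]
  | r :: rest =>
    match r with
    | [s, e] =>
      if s ≤ ce + 1 then pvMergeLoop acc cs (max ce e) rest
      else pvMergeLoop (acc ++ [(cs, ce)]) s e rest
    | _ => []  -- unreachable under Pre_

-- Source B's complement loop over the merged pairs
def pvStepB (st : List (List Int) × Int) (p : Int × Int) : List (List Int) × Int :=
  ((if p.1 - 1 ≥ st.2 then st.1 ++ [[st.2, p.1 - 1]] else st.1), max st.2 (p.2 + 1))

-- Source B's 'cs is None' entry case: merged is empty iff the sorted list is
def pvMergedOf (l : List (List Int)) : List (Int × Int) :=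
  match l with
  | [] => []
  | r :: rest =>
    match r with
    | [s, e] => pvMergeLoop [] s e rest
    | _ => []  -- unreachable under Pre_

def findMaximalUncoveredRanges_alt (n : Int) (ranges : List (List Int)) : List (List Int) :=
  let sortedR := PySem.List.sorted ranges (fun x => PySem.List.pyGetD x 0 0)
  let merged := pvMergedOf sortedR
  let st := merged.foldl pvStepB ([], 0)
  if st.2 ≤ n - 1 then st.1 ++ [[st.2, n - 1]] else st.1

-- ===== PRECONDITION & SPEC =====
-- Pre_: every element of ranges has exactly two entries; on any other shape
-- Python A raises (IndexError in the sort key or ValueError unpacking).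
def Pre_findMaximalUncoveredRanges (n : Int) (ranges : List (List Int)) : Prop :=
  ∀ r ∈ ranges, r.length = 2
instance (n : Int) (ranges : List (List Int)) : Decidable (Pre_findMaximalUncoveredRanges n ranges) := by unfold Pre_findMaximalUncoveredRanges; infer_instance

def pvWitness_findMaximalUncoveredRanges : Int × List (List Int) := (10, [[3, 5], [0, 1], [7, 7]])

def Spec_findMaximalUncoveredRanges (n : Int) (ranges : List (List Int)) (out : List (List Int)) : Prop := out = findMaximalUncoveredRanges_alt n ranges
instance (n : Int) (ranges : List (List Int)) (out : List (List Int)) : Decidable (Spec_findMaximalUncoveredRanges n ranges out) := by unfold Spec_findMaximalUncoveredRanges; infer_instance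

-- ===== CLAIM (what is proved, stated in full; the proofs are below) =====
def Claim_equal_findMaximalUncoveredRanges : Prop := ∀ (n : Int) (ranges : List (List Int)), Dom_findMaximalUncoveredRanges n ranges → Pre_findMaximalUncoveredRanges n ranges → Spec_findMaximalUncoveredRanges n ranges (findMaximalUncoveredRanges n ranges)

-- ===== LEMMAS AND PROOFS =====

-- the fused scan, written as a pure recursion over (start, end) pairs
def pvScan (n prev : Int) : List (Int × Int) → List (List Int)
  | [] => if prev ≤ n - 1 then [[prev, n - 1]] else []
  | (s, e) :: rest => (if s - 1 ≥ prev then [[prev, s - 1]] else []) ++ pvScan n (max prev (e + 1)) rest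

def pvPairs (l : List (List Int)) : List (Int × Int) :=
  l.map (fun r => match r with | [s, e] => (s, e) | _ => (0, 0))

theorem pvFoldA_eq_scan (n : Int) : ∀ (l : List (List Int)) (acc : List (List Int)) (prev : Int),
    (∀ r ∈ l, r.length = 2) →
    (if (l.foldl pvStepA (acc, prev)).2 ≤ n - 1
      then (l.foldl pvStepA (acc, prev)).1 ++ [[(l.foldl pvStepA (acc, prev)).2, n - 1]]
      else (l.foldl pvStepA (acc, prev)).1)
    = acc ++ pvScan n prev (pvPairs l) := by
  intro l
  induction l with
  | nil => intro acc prev _; simp [pvPairs, pvScan]; split_ifs <;> simp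
  | cons r t ih =>
    intro acc prev h
    have hr := h r (by simp)
    match r, hr with
    | [s, e], _ =>
      have ht : ∀ x ∈ t, x.length = 2 := fun x hx => h x (by simp [hx])
      simp only [List.foldl_cons, pvStepA, pvPairs, List.map_cons, pvScan]
      rw [ih _ _ ht]
      split_ifs <;> simp [pvPairs]

theorem pvFoldB_eq_scan (n : Int) : ∀ (l : List (Int × Int)) (acc : List (List Int)) (prev : Int),
    (if (l.foldl pvStepB (acc, prev)).2 ≤ n - 1
      then (l.foldl pvStepB (acc, prev)).1 ++ [[(l.foldl pvStepB (acc, prev)).2, n - 1]]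
      else (l.foldl pvStepB (acc, prev)).1)
    = acc ++ pvScan n prev l := by
  intro l
  induction l with
  | nil => intro acc prev; simp [pvScan]; split_ifs <;> simp
  | cons p t ih =>
    intro acc prev
    simp only [List.foldl_cons, pvStepB, pvScan]
    rw [ih]
    split_ifs <;> simp

theorem pvMergeLoop_append : ∀ (l : List (List Int)) (acc : List (Int × Int)) (cs ce : Int),
    (∀ r ∈ l, r.length = 2) →
    pvMergeLoop acc cs ce l = acc ++ pvMergeLoop [] cs ce l := by
  intro l
  induction l with
  | nil => intro acc cs ce _; simp [pvMergeLoop]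
  | cons r t ih =>
    intro acc cs ce h
    have hr := h r (by simp)
    match r, hr with
    | [s, e], _ =>
      have ht : ∀ x ∈ t, x.length = 2 := fun x hx => h x (by simp [hx])
      simp only [pvMergeLoop]
      split_ifs with hc
      · exact ih acc cs (max ce e) ht
      · rw [ih (acc ++ [(cs, ce)]) s e ht, List.nil_append, ih [(cs, ce)] s e ht]; simp

-- key lemma: scanning the merged segments equals scanning the raw intervals
theorem pvScan_merge (n : Int) : ∀ (l : List (List Int)) (cs ce prev : Int),
    (∀ r ∈ l, r.length = 2) →
    pvScan n prev (pvMergeLoop [] cs ce l) = pvScan n prev ((cs, ce) :: pvPairs l) := by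
  intro l
  induction l with
  | nil => intro cs ce prev _; simp [pvMergeLoop, pvPairs, pvScan]
  | cons r t ih =>
    intro cs ce prev h
    have hr := h r (by simp)
    match r, hr with
    | [s, e], _ =>
      have ht : ∀ x ∈ t, x.length = 2 := fun x hx => h x (by simp [hx])
      simp only [pvMergeLoop, pvPairs, List.map_cons]
      split_ifs with hc
      · rw [ih cs (max ce e) prev ht]
        simp only [pvScan]
        have hgap : ¬ (s - 1 ≥ max prev (ce + 1)) := by omega
        have harg : max (max prev (ce + 1)) (e + 1) = max prev (max ce e + 1) := by omega
        simp [hgap, harg, pvPairs]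
      · rw [pvMergeLoop_append t ([] ++ [(cs, ce)]) s e ht]
        simp only [List.nil_append, List.singleton_append, pvScan]
        rw [ih s e (max prev (ce + 1)) ht]
        simp [pvScan, pvPairs]

-- ===== VERDICT (by name: the statement is the Claim_ definition above) =====
theorem findMaximalUncoveredRanges_spec : Claim_equal_findMaximalUncoveredRanges := by
  intro n ranges _ hpre
  unfold Spec_findMaximalUncoveredRanges findMaximalUncoveredRanges findMaximalUncoveredRanges_alt
  have hs : ∀ r ∈ PySem.List.sorted ranges (fun x => PySem.List.pyGetD x 0 0) false, r.length = 2 := by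
    intro r hr
    exact hpre r ((PySem.List.mem_sorted _ _ _ _).1 hr)
  simp only []
  rw [pvFoldA_eq_scan n _ [] 0 hs]
  match hm : PySem.List.sorted ranges (fun x => PySem.List.pyGetD x 0 0) false with
  | [] =>
    rw [show pvMergedOf [] = [] from rfl, pvFoldB_eq_scan n [] [] 0]
    simp [pvPairs]
  | r :: rest =>
    have hr := hs r (by rw [hm]; simp)
    rw [hm] at hs
    match r, hr with
    | [s, e], _ =>
      have ht : ∀ x ∈ rest, x.length = 2 := fun x hx => hs x (by simp [hx])
      rw [show pvMergedOf ([s, e] :: rest) = pvMergeLoop [] s e rest from rfl,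
        pvFoldB_eq_scan n _ [] 0, pvScan_merge n rest s e 0 ht]
      simp [pvPairs]
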